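-- pv_equiv track=rewrite | github.com/ptrkmlnrsk/cipher | cipher_core.py | rot13_core
-- ===== SOURCE A (Python) =====
-- def rot13_core(text: str=None, shift=13) -> str|list:
--
--     cipher_core_output = []
--     for char in text:
--         if char.isalpha():
--             base = ord('A') if char.isupper() else ord('a')
--             new_char = chr((ord(char) - base + 13) % 26 + base)
--             cipher_core_output.append(new_char)
--         else:
--             cipher_core_output.append(char)
--
--     return ''.join(cipher_core_output)
-- ===== SOURCE B (Python) =====
-- def rot13_core(text: str=None, shift=13) -> str|list:
--     upper = "ABCDEFGHIJKLMNOPQRSTUVWXYZ"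
--     lower = "abcdefghijklmnopqrstuvwxyz"
--     table = str.maketrans(upper + lower,
--                           upper[13:] + upper[:13] + lower[13:] + lower[:13])
--     return text.translate(table)
-- ===== Notes on version B (the rewrite author's own statement) =====
-- stated objective: idiomatic
-- what changed: B builds a ROT13 translation table once with str.maketrans over the 52 letters and returns text.translate(table), replacing A's per-character branch-and-arithmetic loop with a single table-driven pass.
import Mathlib
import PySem

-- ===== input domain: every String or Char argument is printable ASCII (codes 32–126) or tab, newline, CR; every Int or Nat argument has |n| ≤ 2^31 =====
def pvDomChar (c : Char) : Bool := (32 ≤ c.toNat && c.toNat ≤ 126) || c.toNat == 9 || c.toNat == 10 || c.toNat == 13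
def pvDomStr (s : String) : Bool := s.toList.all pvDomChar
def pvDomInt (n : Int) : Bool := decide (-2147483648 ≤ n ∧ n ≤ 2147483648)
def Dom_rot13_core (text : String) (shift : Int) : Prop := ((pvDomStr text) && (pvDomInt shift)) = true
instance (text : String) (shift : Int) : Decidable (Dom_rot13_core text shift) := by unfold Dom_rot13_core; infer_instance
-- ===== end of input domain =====

-- B replaces A's per-character arithmetic loop with a translation table built once (str.maketrans) and one table-driven pass via str.translate (idiomatic; measured faster in a timing run: C-level translate vs a Python-level loop).


-- ===== PORT A =====
-- per-character step of A's loop: letter -> arithmetic ROT13, else unchanged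
def rot13CharA (c : Char) : Char :=
  if PySem.Chars.isalpha c then
    let base : Int := if PySem.Chars.isupper c then 65 else 97
    Char.ofNat (PySem.Int.mod ((c.toNat : Int) - base + 13) 26 + base).toNat
  else c

def rot13_core (text : String) (shift : Int) : String :=
  String.mk (text.toList.foldl (fun acc c => acc ++ [rot13CharA c]) [])

-- ===== PORT B =====
def pvUpper : List Char := "ABCDEFGHIJKLMNOPQRSTUVWXYZ".toList
def pvLower : List Char := "abcdefghijklmnopqrstuvwxyz".toList

-- str.maketrans(src, dst) as a Dict Char Char
def pvMakeTrans (src dst : List Char) : PySem.Dict Char Char :=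
  (src.zip dst).foldl (fun d p => d.insert p.1 p.2) (PySem.Dict.empty)

def pvRotTable : PySem.Dict Char Char :=
  pvMakeTrans (pvUpper ++ pvLower)
    (pvUpper.drop 13 ++ pvUpper.take 13 ++ pvLower.drop 13 ++ pvLower.take 13)

-- text.translate(table): unmapped characters stay themselves
def rot13_core_alt (text : String) (shift : Int) : String :=
  String.mk (text.toList.map (fun c => pvRotTable.getD c c))

-- ===== PRECONDITION & SPEC =====
def Spec_rot13_core (text : String) (shift : Int) (out : String) : Prop := out = rot13_core_alt text shift
instance (text : String) (shift : Int) (out : String) : Decidable (Spec_rot13_core text shift out) := by unfold Spec_rot13_core; infer_instance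

-- ===== CLAIM (what is proved, stated in full; the proofs are below) =====
def Claim_equal_rot13_core : Prop := ∀ (text : String) (shift : Int), Dom_rot13_core text shift → Spec_rot13_core text shift (rot13_core text shift)

-- ===== LEMMAS AND PROOFS =====

-- per-character agreement on the ASCII domain, checked exhaustively over codes < 128
set_option maxRecDepth 8192 in
theorem rot13Char_agree_lt (n : Nat) (h : n < 128) :
    rot13CharA (Char.ofNat n) = pvRotTable.getD (Char.ofNat n) (Char.ofNat n) := by
  revert h
  exact (by decide : ∀ m : Nat, m < 128 → rot13CharA (Char.ofNat m) = pvRotTable.getD (Char.ofNat m) (Char.ofNat m)) n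

set_option maxRecDepth 8192 in
theorem rot13Char_agree (c : Char) (h : pvDomChar c = true) :
    rot13CharA c = pvRotTable.getD c c := by
  have hlt : c.toNat < 128 := by
    simp [pvDomChar] at h; omega
  have := rot13Char_agree_lt c.toNat hlt
  rwa [Char.ofNat_toNat] at this


-- ===== VERDICT (by name: the statement is the Claim_ definition above) =====
set_option maxRecDepth 8192 in
theorem rot13_core_spec : Claim_equal_rot13_core := by
  intro text shift hdom
  unfold Spec_rot13_core rot13_core rot13_core_alt
  rw [PySem.List.foldl_append_singleton_eq_map]
  have hdomS : pvDomStr text = true := by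
    unfold Dom_rot13_core at hdom
    simp only [Bool.and_eq_true] at hdom
    exact hdom.1
  congr 1
  apply List.map_congr_left
  intro c hc
  exact rot13Char_agree c (List.all_eq_true.mp hdomS c hc)
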